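-- pv_equiv track=rewrite | github.com/prohwww/CatchPython | greedy/greedy002.py | CalcBigOne2
-- ===== SOURCE A (Python) =====
-- def CalcBigOne2(n, m, k, data):
--     data.sort()
--     first = data[n-1]
--     second = data[n-2]
--     result = 0
--     while True:
--         for i in range(k):
--             if (m == 0):
--                 break;
--             result += first
--             m -= 1
--         if (m == 0):
--             break
--         result += second
--         m -= 1
--     return result
-- ===== SOURCE B (Python) =====
-- def CalcBigOne2(n, m, k, data):
--     data.sort()
--     first = data[n-1]
--     second = data[n-2]
--     if k <= 0:
--         return m * second
--     q, r = divmod(m, k + 1)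
--     return q * (k * first + second) + r * first
-- ===== Notes on version B (the rewrite author's own statement) =====
-- stated objective: simpler
-- what changed: Replaces the simulated while/for loop that adds first/second one step per unit of m with closed-form arithmetic: q,r = divmod(m, k+1) and result = q*(k*first+second) + r*first (m*second when k<=0); both still sort the list in place.
import Mathlib
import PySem

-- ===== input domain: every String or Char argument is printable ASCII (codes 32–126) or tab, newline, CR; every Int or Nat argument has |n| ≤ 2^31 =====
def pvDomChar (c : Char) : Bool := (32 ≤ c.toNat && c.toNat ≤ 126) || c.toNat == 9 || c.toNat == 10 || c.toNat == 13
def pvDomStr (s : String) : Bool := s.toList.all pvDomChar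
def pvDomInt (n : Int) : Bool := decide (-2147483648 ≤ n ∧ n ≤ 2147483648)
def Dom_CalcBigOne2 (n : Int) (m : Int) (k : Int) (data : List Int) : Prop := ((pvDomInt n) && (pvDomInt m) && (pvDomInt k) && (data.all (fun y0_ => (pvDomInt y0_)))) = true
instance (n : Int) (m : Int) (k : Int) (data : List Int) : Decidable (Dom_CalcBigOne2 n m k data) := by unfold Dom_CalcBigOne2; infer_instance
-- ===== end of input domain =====

-- B replaces A's unit-step while/for accumulation (one addition per unit of m) by
-- closed-form arithmetic on full (k+1)-cycles and the remainder (objective: simpler).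
-- NOTE: both A and B sort `data` in place (data.sort()); the equivalence proved here is
-- about the RETURN value only (the mutation is identical in A and B anyway).

-- ===== PORT A =====
-- inner 'for i in range(k)': j iterations left; state (m, result)
def pvForA (first : Int) : Nat → Int × Int → Int × Int
  | 0, s => s
  | j + 1, (m, r) => if m = 0 then (m, r) else pvForA first j (m - 1, r + first)

-- outer 'while True' loop; fuel only makes the recursion total (A diverges when m < 0)
def pvWhileA (first second k : Int) : Nat → Int → Int → Int
  | 0, _, r => r
  | fuel + 1, m, r =>
    let s := pvForA first k.toNat (m, r)
    if s.1 = 0 then s.2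
    else pvWhileA first second k fuel (s.1 - 1) (s.2 + second)

def CalcBigOne2 (n : Int) (m : Int) (k : Int) (data : List Int) : Int :=
  let d := PySem.List.sorted data (fun x => x) false
  match PySem.List.pyGet? d (n - 1), PySem.List.pyGet? d (n - 2) with
  | some first, some second => pvWhileA first second k (m.toNat + 1) m 0
  | _, _ => 0  -- IndexError: excluded by Pre_

-- ===== PORT B =====
def CalcBigOne2_alt (n : Int) (m : Int) (k : Int) (data : List Int) : Int :=
  let d := PySem.List.sorted data (fun x => x) false
  match PySem.List.pyGet? d (n - 1) with
  | none => 0  -- IndexError: excluded by Pre_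
  | some first =>
    match PySem.List.pyGet? d (n - 2) with
    | none => 0  -- IndexError: excluded by Pre_
    | some second =>
      if k ≤ 0 then m * second
      else
        let q := PySem.Int.floordiv m (k + 1)
        let r := PySem.Int.mod m (k + 1)
        q * (k * first + second) + r * first

-- ===== PRECONDITION & SPEC =====
-- Pre_ excludes exactly where A does not return normally: indices n-1, n-2 out of range
-- (IndexError) and m < 0 (the loop never reaches m == 0 and A diverges).
def Pre_CalcBigOne2 (n : Int) (m : Int) (k : Int) (data : List Int) : Prop :=
  0 ≤ m ∧ PySem.Raise.InRange data.length (n - 1) ∧ PySem.Raise.InRange data.length (n - 2)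
instance (n : Int) (m : Int) (k : Int) (data : List Int) : Decidable (Pre_CalcBigOne2 n m k data) := by unfold Pre_CalcBigOne2; infer_instance

def pvWitness_CalcBigOne2 : Int × Int × Int × List Int := (2, 7, 3, [5, 2])

def Spec_CalcBigOne2 (n : Int) (m : Int) (k : Int) (data : List Int) (out : Int) : Prop := out = CalcBigOne2_alt n m k data
instance (n : Int) (m : Int) (k : Int) (data : List Int) (out : Int) : Decidable (Spec_CalcBigOne2 n m k data out) := by unfold Spec_CalcBigOne2; infer_instance

-- ===== CLAIM (what is proved, stated in full; the proofs are below) =====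
def Claim_equal_CalcBigOne2 : Prop := ∀ (n : Int) (m : Int) (k : Int) (data : List Int), Dom_CalcBigOne2 n m k data → Pre_CalcBigOne2 n m k data → Spec_CalcBigOne2 n m k data (CalcBigOne2 n m k data)

-- ===== LEMMAS AND PROOFS =====

lemma pvForA_spec (f : Int) (j : Nat) (m r : Int) (hm : 0 ≤ m) :
    pvForA f j (m, r) = if (j : Int) ≤ m then (m - j, r + j * f) else (0, r + m * f) := by
  induction j generalizing m r with
  | zero => simp only [Nat.cast_zero]; rw [if_pos hm]; simp [pvForA]
  | succ j ih =>
    simp only [pvForA]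
    by_cases h0 : m = 0
    · rw [if_pos h0, if_neg (by push_cast; omega)]
      subst h0; simp
    · rw [if_neg h0, ih (m - 1) (r + f) (by omega)]
      by_cases hle : (j : Int) ≤ m - 1
      · rw [if_pos hle, if_pos (by push_cast; omega)]
        simp only [Prod.mk.injEq]
        constructor
        · push_cast; ring
        · push_cast; ring
      · rw [if_neg hle, if_neg (by push_cast; omega)]
        simp only [Prod.mk.injEq]
        refine ⟨trivial, by ring⟩

lemma pvWhileA_pos (f s k : Int) (hk : 0 < k) :
    ∀ (fuel : Nat) (m r : Int), 0 ≤ m → m.toNat < fuel →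
    pvWhileA f s k fuel m r = r + (m / (k + 1)) * (k * f + s) + (m % (k + 1)) * f := by
  intro fuel
  induction fuel with
  | zero => intro m r _ h; omega
  | succ fuel ih =>
    intro m r hm hfuel
    have hkc : ((k.toNat : Int)) = k := by omega
    simp only [pvWhileA]
    rw [pvForA_spec f k.toNat m r hm, hkc]
    by_cases hle : k ≤ m
    · rw [if_pos hle]
      by_cases heq : m - k = 0
      · have hmk : m = k := by omega
        have h1 : m / (k + 1) = 0 := Int.ediv_eq_zero_of_lt hm (by omega)
        have h2 : m % (k + 1) = m := Int.emod_eq_of_lt hm (by omega)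
        rw [if_pos heq, h1, h2, hmk]
        ring
      · rw [if_neg heq]
        have hm1 : (0:Int) ≤ m - k - 1 := by omega
        have ht : (m - k - 1).toNat < fuel := by omega
        rw [ih (m - k - 1) (r + k * f + s) hm1 ht]
        have hrw : m - k - 1 = (m - (k + 1)) := by ring
        have hd : m / (k + 1) = (m - (k + 1)) / (k + 1) + 1 := by
          have := Int.add_mul_ediv_right (m - (k + 1)) 1 (show (k + 1) ≠ 0 by omega)
          have h2 : m - (k + 1) + 1 * (k + 1) = m := by ring
          rw [h2] at this
          omega
        have hmod : m % (k + 1) = (m - (k + 1)) % (k + 1) := by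
          conv_lhs => rw [show m = (m - (k+1)) + 1 * (k+1) by ring]
          exact Int.add_mul_emod_self_right ..
        rw [hrw, hd, hmod]; ring
    · rw [if_neg hle]
      have hmk : m < k := by omega
      have h1 : m / (k + 1) = 0 := Int.ediv_eq_zero_of_lt hm (by omega)
      have h2 : m % (k + 1) = m := Int.emod_eq_of_lt hm (by omega)
      rw [if_pos rfl]
      rw [h1, h2]
      ring

lemma pvWhileA_nonpos (f s k : Int) (hk : k ≤ 0) :
    ∀ (fuel : Nat) (m r : Int), 0 ≤ m → m.toNat < fuel →
    pvWhileA f s k fuel m r = r + m * s := by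
  intro fuel
  induction fuel with
  | zero => intro m r _ h; omega
  | succ fuel ih =>
    intro m r hm hfuel
    have hkn : k.toNat = 0 := by omega
    simp only [pvWhileA, hkn, pvForA]
    by_cases h0 : m = 0
    · simp [h0]
    · rw [if_neg h0, ih (m - 1) (r + s) (by omega) (by omega)]
      ring

-- ===== VERDICT (by name: the statement is the Claim_ definition above) =====
theorem CalcBigOne2_spec : Claim_equal_CalcBigOne2 := by
  intro n m k data _ hpre
  obtain ⟨hm, h1, h2⟩ := hpre
  unfold Spec_CalcBigOne2 CalcBigOne2 CalcBigOne2_alt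
  have hlen : (PySem.List.sorted data (fun x => x) false).length = data.length :=
    PySem.List.length_sorted ..
  have hg1 : (PySem.List.pyGet? (PySem.List.sorted data (fun x => x) false) (n - 1)).isSome := by
    rw [Option.isSome_iff_ne_none, ne_eq, PySem.List.pyGet?_eq_none_iff, hlen]
    exact fun h => h h1
  have hg2 : (PySem.List.pyGet? (PySem.List.sorted data (fun x => x) false) (n - 2)).isSome := by
    rw [Option.isSome_iff_ne_none, ne_eq, PySem.List.pyGet?_eq_none_iff, hlen]
    exact fun h => h h2
  obtain ⟨first, hf⟩ := Option.isSome_iff_exists.mp hg1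
  obtain ⟨second, hs⟩ := Option.isSome_iff_exists.mp hg2
  simp only [hf, hs]
  by_cases hk : k ≤ 0
  · rw [if_pos hk, pvWhileA_nonpos first second k hk (m.toNat + 1) m 0 hm (by omega)]
    ring
  · rw [if_neg hk,
      pvWhileA_pos first second k (by omega) (m.toNat + 1) m 0 hm (by omega),
      PySem.Int.floordiv_eq_ediv_of_pos (by omega), PySem.Int.mod_eq_emod_of_pos (by omega)]
    ring
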